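-- pv_equiv track=rewrite | github.com/stogiannidis/srbench | src/data_creation/paper_folding.py | compute_all_layers
-- ===== SOURCE A (Python) =====
-- fold_reflections = {
--     "V": lambda p: (120 - p[0], p[1]),  # Reflect over x=60
--     "H": lambda p: (p[0], 120 - p[1]),  # Reflect over y=60
--     "D": lambda p: (p[1], p[0]),  # Reflect over diagonal y=x
--     "N": lambda p: (120 - p[1], 120 - p[0]),  # Reflect about y=-x through (60,60)
-- }
--
-- def compute_all_layers(punched_holes, folds):
--     """
--     Compute unfolded holes by doubling the layers for each fold.
--     Each fold produces two layers from every existing layer.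
--     """
--     layers = [punched_holes]
--     for fold in folds:
--         new_layers = []
--         for layer in layers:
--             new_layers.append(layer)
--             new_layers.append([fold_reflections[fold](h) for h in layer])
--         layers = new_layers
--     # Flatten layers; note that duplicates are allowed.
--     return [h for layer in layers for h in layer]
-- ===== SOURCE B (Python) =====
-- from itertools import product
--
-- fold_reflections = {
--     "V": lambda p: (120 - p[0], p[1]),
--     "H": lambda p: (p[0], 120 - p[1]),
--     "D": lambda p: (p[1], p[0]),
--     "N": lambda p: (120 - p[1], 120 - p[0]),
-- }
--
-- def compute_all_layers(punched_holes, folds):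
--     """Enumerate all 2^len(folds) reflection combinations directly:
--     bit i of a combination says whether fold i's reflection is applied;
--     one layer per combination, in itertools.product order."""
--     result = []
--     for bits in product((0, 1), repeat=len(folds)):
--         for h in punched_holes:
--             p = h
--             for fold, bit in zip(folds, bits):
--                 if bit:
--                     p = fold_reflections[fold](p)
--             result.append(p)
--     return result
-- ===== Notes on version B (the rewrite author's own statement) =====
-- stated objective: alternative
-- what changed: Replaces the iterative layer-doubling (rebuilding the whole layer list once per fold) by direct enumeration of all 2^len(folds) reflection combinations via itertools.product, applying each combination's reflections hole by hole.
import Mathlib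
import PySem

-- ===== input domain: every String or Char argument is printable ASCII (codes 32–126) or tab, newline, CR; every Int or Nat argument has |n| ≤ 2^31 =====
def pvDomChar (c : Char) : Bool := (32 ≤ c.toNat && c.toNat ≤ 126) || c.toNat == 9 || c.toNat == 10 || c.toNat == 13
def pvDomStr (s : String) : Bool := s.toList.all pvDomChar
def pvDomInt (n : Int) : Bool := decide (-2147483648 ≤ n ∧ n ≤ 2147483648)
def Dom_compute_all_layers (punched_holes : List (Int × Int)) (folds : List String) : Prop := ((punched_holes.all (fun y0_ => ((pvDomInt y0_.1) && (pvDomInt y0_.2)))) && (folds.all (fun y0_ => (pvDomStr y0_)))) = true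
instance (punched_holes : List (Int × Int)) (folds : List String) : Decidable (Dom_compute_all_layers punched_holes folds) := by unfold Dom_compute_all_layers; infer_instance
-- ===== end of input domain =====

-- B replaces A's iterative layer-doubling by direct enumeration of all 2^len(folds)
-- reflection combinations (itertools.product), one output layer per combination (alternative decomposition).


-- ===== PORT A =====
-- fold_reflections lookup; the final branch (unknown key) is a KeyError in Python,
-- excluded by Pre_compute_all_layers.
def reflFn (fold : String) (p : Int × Int) : Int × Int :=
  if fold = "V" then (120 - p.1, p.2)
  else if fold = "H" then (p.1, 120 - p.2)
  else if fold = "D" then (p.2, p.1)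
  else if fold = "N" then (120 - p.2, 120 - p.1)
  else p

def compute_all_layers (punched_holes : List (Int × Int)) (folds : List String) : List (Int × Int) :=
  let layers := folds.foldl
    (fun layers fold => layers.flatMap (fun layer => [layer, layer.map (reflFn fold)]))
    [punched_holes]
  layers.flatMap (fun layer => layer)

-- ===== PORT B =====
-- itertools.product((0,1), repeat=n), in product order (first position varies slowest)
def bitTuples : Nat → List (List Nat)
  | 0 => [[]]
  | n+1 => ([0, 1] : List Nat).flatMap (fun b => (bitTuples n).map (fun t => b :: t))

-- the inner loop of B: apply fold i's reflection when bit i is set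
def applyFolds (folds : List String) (bits : List Nat) (p : Int × Int) : Int × Int :=
  (folds.zip bits).foldl (fun q fb => if fb.2 ≠ 0 then reflFn fb.1 q else q) p

def compute_all_layers_alt (punched_holes : List (Int × Int)) (folds : List String) : List (Int × Int) :=
  (bitTuples folds.length).flatMap (fun bits => punched_holes.map (applyFolds folds bits))

-- ===== PRECONDITION & SPEC =====
-- Pre_ excludes exactly the inputs where Python A raises KeyError: an unknown fold
-- string with a nonempty hole list (with no holes the lookup is never evaluated).
def Pre_compute_all_layers (punched_holes : List (Int × Int)) (folds : List String) : Prop :=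
  punched_holes = [] ∨ ∀ f ∈ folds, f = "V" ∨ f = "H" ∨ f = "D" ∨ f = "N"
instance (punched_holes : List (Int × Int)) (folds : List String) : Decidable (Pre_compute_all_layers punched_holes folds) := by unfold Pre_compute_all_layers; infer_instance

def pvWitness_compute_all_layers : (List (Int × Int)) × List String := ([(10, 20), (30, 40)], ["V", "D"])

def Spec_compute_all_layers (punched_holes : List (Int × Int)) (folds : List String) (out : List (Int × Int)) : Prop := out = compute_all_layers_alt punched_holes folds
instance (punched_holes : List (Int × Int)) (folds : List String) (out : List (Int × Int)) : Decidable (Spec_compute_all_layers punched_holes folds out) := by unfold Spec_compute_all_layers; infer_instance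

-- ===== CLAIM (what is proved, stated in full; the proofs are below) =====
def Claim_equal_compute_all_layers : Prop := ∀ (punched_holes : List (Int × Int)) (folds : List String), Dom_compute_all_layers punched_holes folds → Pre_compute_all_layers punched_holes folds → Spec_compute_all_layers punched_holes folds (compute_all_layers punched_holes folds)

-- ===== LEMMAS AND PROOFS =====

-- A's layer-doubling loop, as a function of the starting layer list
def layersAfter (folds : List String) (L : List (List (Int × Int))) : List (List (Int × Int)) :=
  folds.foldl (fun layers fold => layers.flatMap (fun layer => [layer, layer.map (reflFn fold)])) L

lemma layersAfter_nil (L : List (List (Int × Int))) : layersAfter [] L = L := rfl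

lemma layersAfter_cons (f : String) (fs : List String) (L : List (List (Int × Int))) :
    layersAfter (f :: fs) L = layersAfter fs (L.flatMap (fun layer => [layer, layer.map (reflFn f)])) := rfl

lemma layersAfter_flatMap (fs : List String) (L : List (List (Int × Int))) :
    layersAfter fs L = L.flatMap (fun l => layersAfter fs [l]) := by
  induction fs generalizing L with
  | nil => simp [layersAfter_nil]
  | cons f fs ih =>
    rw [layersAfter_cons, ih, List.flatMap_assoc]
    congr 1; funext l
    rw [layersAfter_cons, ih]
    simp

lemma layersAfter_single (fs : List String) (ph : List (Int × Int)) :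
    layersAfter fs [ph] = (bitTuples fs.length).map (fun bits => ph.map (applyFolds fs bits)) := by
  induction fs generalizing ph with
  | nil =>
    simp only [layersAfter_nil, List.length_nil, bitTuples, List.map_cons, List.map_nil]
    have h : applyFolds [] [] = id := rfl
    rw [h, List.map_id]
  | cons f fs ih =>
    rw [layersAfter_cons]
    have h2 : ([ph].flatMap (fun layer => [layer, layer.map (reflFn f)]))
        = [ph, ph.map (reflFn f)] := by simp
    rw [h2]
    rw [layersAfter_flatMap fs [ph, ph.map (reflFn f)]]
    simp only [List.flatMap_cons, List.flatMap_nil, List.append_nil]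
    rw [ih ph, ih (ph.map (reflFn f))]
    show _ = (bitTuples (fs.length + 1)).map _
    rw [bitTuples]
    simp only [List.flatMap_cons, List.flatMap_nil, List.append_nil, List.map_append,
      List.map_map]
    congr 1

-- ===== VERDICT (by name: the statement is the Claim_ definition above) =====
theorem compute_all_layers_spec : Claim_equal_compute_all_layers := by
  intro ph folds _ _
  show compute_all_layers ph folds = compute_all_layers_alt ph folds
  unfold compute_all_layers compute_all_layers_alt
  rw [show folds.foldl (fun layers fold => layers.flatMap (fun layer => [layer, layer.map (reflFn fold)])) [ph] = layersAfter folds [ph] from rfl]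
  rw [layersAfter_single]
  rw [List.flatMap_def, List.map_map]
  rfl
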